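-- pv_equiv track=rewrite | github.com/nguyenchiemminhvu/DSA | Problems/Leetcode/MakeArrayNonDecreasing/solve.py | maximumPossibleSize
-- ===== SOURCE A (Python) =====
-- from typing import List
--
-- def maximumPossibleSize(nums: List[int]) -> int:
--     n = len(nums)
--
--     right_gt = [n] * n
--     st = []
--     for i in range(n - 1, -1, -1):
--         while st and nums[st[-1]] < nums[i]:
--             st.pop()
--         if st:
--             right_gt[i] = st[-1]
--         st.append(i)
--
--     i = 0
--     remain = n
--     while i < n:
--         right = right_gt[i]
--         remain -= (right - i - 1)
--         i = right
--
--     return remain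
-- ===== SOURCE B (Python) =====
-- from typing import List
--
-- def maximumPossibleSize(nums: List[int]) -> int:
--     # One left-to-right scan: the answer is the number of elements that are
--     # >= every element before them (running-maximum records, ties kept).
--     count = 0
--     running = None
--     for x in nums:
--         if running is None or x >= running:
--             count += 1
--             running = x
--     return count
-- ===== Notes on version B (the rewrite author's own statement) =====
-- stated objective: simpler
-- what changed: Replaces the right-to-left monotonic-stack construction of a next-greater-or-equal index array plus a pointer-jump loop with a single left-to-right scan counting elements >= the running maximum (the answer equals the number of such record elements).
import Mathlib
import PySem

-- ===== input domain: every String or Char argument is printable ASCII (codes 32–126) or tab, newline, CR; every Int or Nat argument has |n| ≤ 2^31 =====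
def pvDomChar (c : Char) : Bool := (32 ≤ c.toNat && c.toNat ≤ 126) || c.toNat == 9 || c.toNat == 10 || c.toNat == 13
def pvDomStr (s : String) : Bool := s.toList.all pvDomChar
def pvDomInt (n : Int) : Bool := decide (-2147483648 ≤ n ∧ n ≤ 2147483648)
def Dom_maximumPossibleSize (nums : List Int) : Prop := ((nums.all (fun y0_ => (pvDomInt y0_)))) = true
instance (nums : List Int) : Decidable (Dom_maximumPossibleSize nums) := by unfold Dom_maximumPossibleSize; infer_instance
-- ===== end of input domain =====

-- B replaces A's monotonic stack + next-index array + jump loop with one scan counting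
-- running-maximum records (objective: simpler, O(1) extra space instead of O(n)).

-- ===== PORT A =====
-- inner `while st and nums[st[-1]] < nums[i]: st.pop()`; the Lean list head is Python's st[-1]
def pvPop (nums : List Int) (x : Int) : List Int → List Int
  | [] => []
  | t :: rest => if PySem.List.pyGetD nums t 0 < x then pvPop nums x rest else t :: rest

-- `while i < n:` jump loop; fuel n+1 suffices since i strictly increases every iteration
def pvJump (n : Int) (rg : List Int) : Nat → Int → Int → Int
  | 0, _, remain => remain
  | fuel + 1, i, remain =>
    if i < n then
      pvJump n rg fuel (PySem.List.pyGetD rg i 0)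
        (remain - (PySem.List.pyGetD rg i 0 - i - 1))
    else remain

-- one iteration of `for i in range(n-1, -1, -1)`: acc = (right_gt, st)
def pvBuildStep (nums : List Int) (acc : List Int × List Int) (i : Int) : List Int × List Int :=
  let st' := pvPop nums (PySem.List.pyGetD nums i 0) acc.2
  let rg' := match st' with
    | [] => acc.1
    | t :: _ => PySem.List.pySetD acc.1 i t
  (rg', i :: st')

def maximumPossibleSize (nums : List Int) : Int :=
  let n : Int := nums.length
  let p := (PySem.List.pyRange (n - 1) (-1) (-1)).foldl (pvBuildStep nums)
    (List.replicate nums.length n, [])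
  pvJump n p.1 (nums.length + 1) 0 n

-- ===== PORT B =====
-- loop body of Source B: state = (count, running maximum as Option)
def pvScanStep (acc : Int × Option Int) (x : Int) : Int × Option Int :=
  match acc.2 with
  | none => (acc.1 + 1, some x)
  | some m => if m ≤ x then (acc.1 + 1, some x) else acc

def maximumPossibleSize_alt (nums : List Int) : Int :=
  (nums.foldl pvScanStep ((0 : Int), (none : Option Int))).1

-- ===== PRECONDITION & SPEC =====
def Spec_maximumPossibleSize (nums : List Int) (out : Int) : Prop := out = maximumPossibleSize_alt nums
instance (nums : List Int) (out : Int) : Decidable (Spec_maximumPossibleSize nums out) := by unfold Spec_maximumPossibleSize; infer_instance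

-- ===== CLAIM (what is proved, stated in full; the proofs are below) =====
def Claim_equal_maximumPossibleSize : Prop := ∀ (nums : List Int), Dom_maximumPossibleSize nums → Spec_maximumPossibleSize nums (maximumPossibleSize nums)

-- ===== LEMMAS AND PROOFS =====

-- value of nums at Nat index j (indices handled by the ports are always in range)
def pvV (nums : List Int) (j : Nat) : Int := nums.getD j 0

-- offset of the first element ≥ m, or the length if none
def pvFindGe (m : Int) : List Int → Nat
  | [] => 0
  | x :: l => if m ≤ x then 0 else pvFindGe m l + 1

-- first index t ≥ j with nums[t] ≥ m, or nums.length if none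
def pvFirst (nums : List Int) (m : Int) (j : Nat) : Nat := j + pvFindGe m (nums.drop j)

-- next index t > i with nums[t] ≥ nums[i] (the meaning of A's right_gt[i])
def pvNext (nums : List Int) (i : Nat) : Nat := pvFirst nums (pvV nums i) (i + 1)

lemma pvNext_gt (nums : List Int) (i : Nat) : i < pvNext nums i := by
  simp only [pvNext, pvFirst]; omega

-- the chain 0 → next 0 → … of indices A's jump loop visits, starting at i
def pvChain (nums : List Int) (i : Nat) : List Int :=
  if _h : i < nums.length then (i : Int) :: pvChain nums (pvNext nums i) else []
  termination_by nums.length - i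
  decreasing_by have := pvNext_gt nums i; omega

lemma pvFindGe_le (m : Int) (l : List Int) : pvFindGe m l ≤ l.length := by
  induction l with
  | nil => simp [pvFindGe]
  | cons x l ih => simp only [pvFindGe]; split <;> simp only [List.length_cons] <;> omega

lemma pvFindGe_lt (m : Int) (l : List Int) (j : Nat) (hj : j < pvFindGe m l) :
    l.getD j 0 < m := by
  induction l generalizing j with
  | nil => simp [pvFindGe] at hj
  | cons x l ih =>
    simp only [pvFindGe] at hj
    split at hj
    · omega
    · cases j with
      | zero => simpa using by omega
      | succ j => simpa using ih j (by omega)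

lemma pvFindGe_found (m : Int) (l : List Int) (h : pvFindGe m l < l.length) :
    m ≤ l.getD (pvFindGe m l) 0 := by
  induction l with
  | nil => simp at h
  | cons x l ih =>
    simp only [pvFindGe] at h ⊢
    split
    · simpa
    · have : pvFindGe m l < l.length := by
        simp only [List.length_cons] at h; split at h <;> omega
      simpa using ih this

lemma pvFindGe_append (m : Int) (l1 l2 : List Int) (h : ∀ x ∈ l1, x < m) :
    pvFindGe m (l1 ++ l2) = l1.length + pvFindGe m l2 := by
  induction l1 with
  | nil => simp
  | cons x l1 ih =>
    have hx : x < m := h x (by simp)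
    simp only [List.cons_append, pvFindGe, if_neg (by omega : ¬ m ≤ x)]
    rw [ih (fun y hy => h y (by simp [hy]))]
    simp; omega

lemma pvGetD_drop (l : List Int) (s j : Nat) : (l.drop s).getD j 0 = l.getD (s + j) 0 := by
  simp [List.getD_eq_getElem?_getD, List.getElem?_drop]

lemma pvNext_le (nums : List Int) (i : Nat) (h : i < nums.length) :
    pvNext nums i ≤ nums.length := by
  have := pvFindGe_le (pvV nums i) (nums.drop (i + 1))
  simp only [List.length_drop] at this
  simp only [pvNext, pvFirst]; omega

lemma pvNext_between (nums : List Int) (i t : Nat) (h1 : i < t) (h2 : t < pvNext nums i) :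
    pvV nums t < pvV nums i := by
  have := pvFindGe_lt (pvV nums i) (nums.drop (i + 1)) (t - (i + 1))
    (by simp only [pvNext, pvFirst] at h2; omega)
  rwa [pvGetD_drop, show i + 1 + (t - (i + 1)) = t by omega] at this

lemma pvNext_val (nums : List Int) (i : Nat) (h : pvNext nums i < nums.length) :
    pvV nums i ≤ pvV nums (pvNext nums i) := by
  have := pvFindGe_found (pvV nums i) (nums.drop (i + 1))
    (by simpa [List.length_drop] using by simp only [pvNext, pvFirst] at h ⊢; omega)
  rwa [pvGetD_drop, show i + 1 + pvFindGe (pvV nums i) (nums.drop (i+1)) = pvNext nums i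
    from by simp only [pvNext, pvFirst]] at this

lemma pvChain_eq_nil (nums : List Int) (i : Nat) (h : ¬ i < nums.length) :
    pvChain nums i = [] := by rw [pvChain]; simp [h]

lemma pvChain_eq_cons (nums : List Int) (i : Nat) (h : i < nums.length) :
    pvChain nums i = (i : Int) :: pvChain nums (pvNext nums i) := by
  rw [pvChain]; simp [h]

-- all values at indices in [j, k) are < m  ⇒  the first ≥ m from j is the first from k
lemma pvFirst_congr (nums : List Int) (m : Int) (j k : Nat) (hjk : j ≤ k)
    (hk : k ≤ nums.length) (h : ∀ t, j ≤ t → t < k → pvV nums t < m) :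
    pvFirst nums m j = pvFirst nums m k := by
  have hsplit : nums.drop j = (nums.drop j).take (k - j) ++ nums.drop k := by
    conv_lhs => rw [← List.take_append_drop (k - j) (nums.drop j)]
    rw [List.drop_drop, show j + (k - j) = k from by omega]
  have hall : ∀ x ∈ (nums.drop j).take (k - j), x < m := by
    intro x hx
    rw [List.mem_iff_getElem] at hx
    obtain ⟨s, hs, rfl⟩ := hx
    have hs' : s < k - j := by
      simp only [List.length_take, List.length_drop] at hs; omega
    have hb : j + s < nums.length := by omega
    have hval : ((nums.drop j).take (k - j))[s] = pvV nums (j + s) := by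
      simp [List.getElem_take, List.getElem_drop, pvV,
        List.getD_eq_getElem?_getD, List.getElem?_eq_getElem hb]
    rw [hval]
    exact h (j + s) (by omega) (by omega)
  rw [pvFirst, pvFirst, hsplit, pvFindGe_append m _ _ hall]
  simp only [List.length_take, List.length_drop]
  omega

-- popping A's stack for suffix j with threshold m yields the stack for suffix (first ≥ m)
lemma pvFirst_self (nums : List Int) (m : Int) (j : Nat)
    (h : ¬ (j < nums.length ∧ pvV nums j < m)) : pvFirst nums m j = j := by
  by_cases hj : j < nums.length
  · have hm : m ≤ pvV nums j := by by_contra hc; exact h ⟨hj, by omega⟩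
    rw [pvFirst, List.drop_eq_getElem_cons hj, pvFindGe,
      if_pos (by rwa [pvV, List.getD_eq_getElem?_getD, List.getElem?_eq_getElem hj] at hm)]
    omega
  · rw [pvFirst, List.drop_eq_nil_of_le (by omega), pvFindGe]
    omega

lemma pvPop_chain (nums : List Int) (m : Int) (j : Nat) :
    pvPop nums m (pvChain nums j) = pvChain nums (pvFirst nums m j) := by
  by_cases hj : j < nums.length
  · rw [pvChain_eq_cons nums j hj]
    simp only [pvPop, PySem.List.pyGetD_natCast]
    by_cases hvm : nums.getD j 0 < m
    · rw [if_pos hvm, pvPop_chain nums m (pvNext nums j)]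
      congr 1
      refine (pvFirst_congr nums m j (pvNext nums j) (le_of_lt (pvNext_gt nums j))
        (pvNext_le nums j hj) ?_).symm ▸ rfl
      intro t h1 h2
      rcases eq_or_lt_of_le h1 with rfl | h1'
      · exact hvm
      · exact lt_trans (pvNext_between nums j t h1' h2) hvm
    · rw [if_neg hvm, pvFirst_self nums m j (by rw [pvV]; tauto), pvChain_eq_cons nums j hj]
  · rw [pvChain_eq_nil nums j hj]
    rw [pvFirst_self nums m j (by tauto), pvChain_eq_nil nums j hj, pvPop]
termination_by nums.length - j
decreasing_by have := pvNext_gt nums j; omega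

lemma pvGetD_set (l : List Int) (k j : Nat) (v : Int) :
    (l.set k v).getD j 0 = if j = k ∧ k < l.length then v else l.getD j 0 := by
  by_cases hjk : j = k
  · subst hjk
    by_cases hk : j < l.length
    · simp [List.getD_eq_getElem?_getD, hk]
    · simp [List.getD_eq_getElem?_getD, hk, List.set_eq_of_length_le (by omega : l.length ≤ j)]
  · simp [List.getD_eq_getElem?_getD, List.getElem?_set_ne (by omega : k ≠ j), hjk]

-- one build iteration: stack for suffix i+1 becomes stack for suffix i; right_gt[i] is set
lemma pvBuildStep_eq (nums rg : List Int) (i : Nat) (hi : i < nums.length) :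
    pvBuildStep nums (rg, pvChain nums (i + 1)) (i : Int)
      = ((if pvNext nums i < nums.length then rg.set i ((pvNext nums i : Nat) : Int) else rg),
          pvChain nums i) := by
  unfold pvBuildStep
  simp only [PySem.List.pyGetD_natCast]
  rw [pvPop_chain nums (nums.getD i 0) (i + 1),
    show pvFirst nums (nums.getD i 0) (i + 1) = pvNext nums i from rfl]
  by_cases hnl : pvNext nums i < nums.length
  · rw [if_pos hnl, pvChain_eq_cons nums (pvNext nums i) hnl]
    refine Prod.ext ?_ ?_
    · simp [PySem.List.pySetD_natCast]
    · simp only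
      rw [pvChain_eq_cons nums i hi, pvChain_eq_cons nums (pvNext nums i) hnl]
  · rw [if_neg hnl, pvChain_eq_nil nums (pvNext nums i) hnl]
    refine Prod.ext rfl ?_
    simp only
    rw [pvChain_eq_cons nums i hi, pvChain_eq_nil nums (pvNext nums i) hnl]

-- the stack-building fold: stack invariant and the final contents of right_gt
lemma pvBuild_loop (nums : List Int) : ∀ i : Nat, i ≤ nums.length →
    ∀ rg : List Int, rg.length = nums.length →
    (∀ j : Nat, j < nums.length →
      rg.getD j 0 = if i ≤ j then ((pvNext nums j : Nat) : Int) else (nums.length : Int)) →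
    ∃ rg' : List Int,
      ((PySem.List.pyRange ((i : Int) - 1) (-1) (-1)).foldl (pvBuildStep nums)
        (rg, pvChain nums i)) = (rg', pvChain nums 0) ∧
      rg'.length = nums.length ∧
      (∀ j : Nat, j < nums.length → rg'.getD j 0 = ((pvNext nums j : Nat) : Int)) := by
  intro i
  induction i with
  | zero =>
    intro _ rg hlen hinv
    rw [show ((0 : Nat) : Int) - 1 = -1 from by norm_num,
      PySem.List.pyRange_neg_one_eq_nil le_rfl, List.foldl_nil]
    exact ⟨rg, rfl, hlen, fun j hj => by simpa using hinv j hj⟩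
  | succ i ih =>
    intro hle rg hlen hinv
    have hi : i < nums.length := hle
    rw [show ((i + 1 : Nat) : Int) - 1 = (i : Int) from by push_cast; ring,
      PySem.List.pyRange_neg_one_cons (by have := Int.natCast_nonneg i; omega : (-1 : Int) < (i : Int)),
      List.foldl_cons, pvBuildStep_eq nums rg i hi]
    apply ih (le_of_lt hle)
    · split
      · simpa using hlen
      · exact hlen
    · intro j hj
      split
      · rename_i hnl
        rw [pvGetD_set]
        by_cases hji : j = i
        · subst hji
          rw [if_pos ⟨rfl, by omega⟩, if_pos le_rfl]
        · rw [if_neg (by tauto), hinv j hj]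
          by_cases hij : i ≤ j
          · rw [if_pos hij, if_pos (by omega)]
          · rw [if_neg hij, if_neg (by omega)]
      · rename_i hnl
        rw [hinv j hj]
        by_cases hji : j = i
        · subst hji
          rw [if_neg (by omega), if_pos le_rfl]
          have := pvNext_le nums j hi
          have : pvNext nums j = nums.length := by omega
          rw [this]
        · by_cases hij : i ≤ j
          · rw [if_pos (by omega), if_pos hij]
          · rw [if_neg (by omega), if_neg (by omega)]

lemma pvJump_eq (nums rg : List Int)
    (hrg : ∀ j : Nat, j < nums.length → rg.getD j 0 = ((pvNext nums j : Nat) : Int)) :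
    ∀ (fuel : Nat) (i : Nat), i ≤ nums.length → nums.length - i < fuel → ∀ r : Int,
      pvJump (nums.length : Int) rg fuel (i : Int) r
        = r - ((nums.length : Int) - (i : Int)) + ((pvChain nums i).length : Int) := by
  intro fuel
  induction fuel with
  | zero => intro i _ hf; omega
  | succ fuel ih =>
    intro i hi hf r
    by_cases hilt : i < nums.length
    · rw [pvJump, if_pos (by exact_mod_cast hilt), PySem.List.pyGetD_natCast,
        hrg i hilt, ih (pvNext nums i) (pvNext_le nums i hilt)
          (by have := pvNext_gt nums i; omega),
        pvChain_eq_cons nums i hilt]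
      have := pvNext_gt nums i
      have := pvNext_le nums i hilt
      simp only [List.length_cons]
      push_cast
      ring_nf
    · rw [pvJump, if_neg (by exact_mod_cast hilt),
        pvChain_eq_nil nums i hilt]
      have : i = nums.length := by omega
      subst this
      simp

lemma pvA_eq_chainLen (nums : List Int) :
    maximumPossibleSize nums = ((pvChain nums 0).length : Int) := by
  obtain ⟨rg', hfold, hlen, hvals⟩ := pvBuild_loop nums nums.length le_rfl
    (List.replicate nums.length (nums.length : Int)) (by simp)
    (fun j hj => by
      rw [List.getD_replicate, if_neg (by omega)]
      simp [hj])
  rw [pvChain_eq_nil nums nums.length (lt_irrefl _)] at hfold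
  simp only [maximumPossibleSize, hfold]
  have h2 := pvJump_eq nums rg' hvals (nums.length + 1) 0 (by omega) (by omega)
    ((nums.length : Nat) : Int)
  push_cast at h2 ⊢
  rw [h2]
  ring

lemma pvScan_const (l : List Int) (c : Int) (m : Int) (h : ∀ x ∈ l, x < m) :
    l.foldl pvScanStep (c, some m) = (c, some m) := by
  induction l generalizing c with
  | nil => rfl
  | cons x l ih =>
    have hx : x < m := h x (by simp)
    simp only [List.foldl_cons, pvScanStep, if_neg (by omega : ¬ m ≤ x)]
    exact ih c (fun y hy => h y (by simp [hy]))

lemma pvScan_suffix (nums : List Int) (i : Nat) (hi : i < nums.length) (c : Int) :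
    ∃ m', (nums.drop (i + 1)).foldl pvScanStep (c, some (pvV nums i))
      = (c + ((pvChain nums (pvNext nums i)).length : Int), m') := by
  by_cases hj : pvNext nums i < nums.length
  · have hnext := pvNext_le nums i hi
    have hgt := pvNext_gt nums i
    have hsplit : nums.drop (i + 1)
        = (nums.drop (i + 1)).take (pvNext nums i - (i + 1)) ++ nums.drop (pvNext nums i) := by
      conv_lhs => rw [← List.take_append_drop (pvNext nums i - (i + 1)) (nums.drop (i + 1))]
      rw [List.drop_drop, show i + 1 + (pvNext nums i - (i + 1)) = pvNext nums i from by omega]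
    have hall : ∀ x ∈ (nums.drop (i + 1)).take (pvNext nums i - (i + 1)), x < pvV nums i := by
      intro x hx
      rw [List.mem_iff_getElem] at hx
      obtain ⟨s, hs, rfl⟩ := hx
      have hs' : s < pvNext nums i - (i + 1) := by
        simp only [List.length_take, List.length_drop] at hs; omega
      have hb : i + 1 + s < nums.length := by omega
      have hval : ((nums.drop (i + 1)).take (pvNext nums i - (i + 1)))[s] = pvV nums (i + 1 + s) := by
        simp [List.getElem_take, List.getElem_drop, pvV,
          List.getD_eq_getElem?_getD, List.getElem?_eq_getElem hb]
      rw [hval]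
      exact pvNext_between nums i (i + 1 + s) (by omega) (by omega)
    have hdropj : nums.drop (pvNext nums i) = pvV nums (pvNext nums i) :: nums.drop (pvNext nums i + 1) := by
      rw [List.drop_eq_getElem_cons hj]
      congr 1
      simp [pvV, List.getD_eq_getElem?_getD, List.getElem?_eq_getElem hj]
    rw [hsplit, List.foldl_append, pvScan_const _ _ _ hall, hdropj]
    simp only [List.foldl_cons, pvScanStep, if_pos (pvNext_val nums i hj)]
    obtain ⟨m', hm'⟩ := pvScan_suffix nums (pvNext nums i) hj (c + 1)
    refine ⟨m', ?_⟩
    rw [hm', pvChain_eq_cons nums (pvNext nums i) hj]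
    refine Prod.ext ?_ rfl
    simp only [List.length_cons]
    push_cast
    ring
  · have hall : ∀ x ∈ nums.drop (i + 1), x < pvV nums i := by
      intro x hx
      rw [List.mem_iff_getElem] at hx
      obtain ⟨s, hs, rfl⟩ := hx
      have hb : i + 1 + s < nums.length := by
        simp only [List.length_drop] at hs; omega
      have hval : (nums.drop (i + 1))[s] = pvV nums (i + 1 + s) := by
        simp [List.getElem_drop, pvV, List.getD_eq_getElem?_getD, List.getElem?_eq_getElem hb]
      rw [hval]
      exact pvNext_between nums i (i + 1 + s) (by omega) (by omega)
    rw [pvScan_const _ _ _ hall, pvChain_eq_nil nums _ hj]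
    exact ⟨some (pvV nums i), by simp⟩
termination_by nums.length - i
decreasing_by have := pvNext_gt nums i; omega

lemma pvB_eq_chainLen (nums : List Int) :
    maximumPossibleSize_alt nums = ((pvChain nums 0).length : Int) := by
  cases nums with
  | nil => rw [pvChain_eq_nil _ _ (by simp)]; rfl
  | cons x rest =>
    have h0 : 0 < (x :: rest).length := by simp
    have hv0 : pvV (x :: rest) 0 = x := rfl
    obtain ⟨m', hm'⟩ := pvScan_suffix (x :: rest) 0 h0 1
    rw [maximumPossibleSize_alt, List.foldl_cons]
    have hstep : pvScanStep ((0 : Int), (none : Option Int)) x = (1, some x) := rfl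
    simp only [hv0, show (x :: rest).drop (0 + 1) = rest from rfl] at hm'
    rw [hstep, hm', pvChain_eq_cons (x :: rest) 0 h0]
    simp only [List.length_cons]
    push_cast
    ring

-- ===== VERDICT (by name: the statement is the Claim_ definition above) =====
theorem maximumPossibleSize_spec : Claim_equal_maximumPossibleSize := by
  intro nums _
  unfold Spec_maximumPossibleSize
  rw [pvA_eq_chainLen, pvB_eq_chainLen]
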